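-- pv_equiv track=rewrite | github.com/phanthaithuc/Algorithm-design | Array/Index_of_larger_next_number.py | larger_number
-- ===== SOURCE A (Python) =====
-- def larger_number(nums: []) -> []:
--     if not nums:
--         return
--     res = []
--     for i in range(len(nums) - 1):
--         if nums[i + 1] <= nums[i]:
--             for j in range(i, len(nums)):
--                 if nums[j] > nums[i]:
--                     res.append(j)
--                     break
--                 res.append(-1)
--
--         elif nums[i + 1] > nums[i]:
--             res.append(i + 1)
--
--     return res
-- ===== SOURCE B (Python) =====
-- def larger_number(nums: []) -> []:
--     if not nums:
--         return
--     n = len(nums)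
--     ng = [n] * n  # ng[i] = index of next strictly greater element after i, n if none
--     for i in range(n - 2, -1, -1):
--         j = i + 1
--         while j < n and nums[j] <= nums[i]:
--             j = ng[j]
--         ng[i] = j
--     res = []
--     for i in range(n - 1):
--         if nums[i + 1] > nums[i]:
--             res.append(i + 1)
--         else:
--             g = ng[i]
--             if g < n:
--                 res.extend([-1] * (g - i))
--                 res.append(g)
--             else:
--                 res.extend([-1] * (n - i))
--     return res
-- ===== Notes on version B (the rewrite author's own statement) =====
-- stated objective: alternative
-- what changed: Replaces A's per-index forward rescans by a right-to-left next-greater pass with pointer jumping (j = ng[j]) that fills a next-greater-index table once, then reconstructs each -1-padded block from that table.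
-- outside the precondition, e.g. on larger_number([]): A returns None, B returns None
import Mathlib
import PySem

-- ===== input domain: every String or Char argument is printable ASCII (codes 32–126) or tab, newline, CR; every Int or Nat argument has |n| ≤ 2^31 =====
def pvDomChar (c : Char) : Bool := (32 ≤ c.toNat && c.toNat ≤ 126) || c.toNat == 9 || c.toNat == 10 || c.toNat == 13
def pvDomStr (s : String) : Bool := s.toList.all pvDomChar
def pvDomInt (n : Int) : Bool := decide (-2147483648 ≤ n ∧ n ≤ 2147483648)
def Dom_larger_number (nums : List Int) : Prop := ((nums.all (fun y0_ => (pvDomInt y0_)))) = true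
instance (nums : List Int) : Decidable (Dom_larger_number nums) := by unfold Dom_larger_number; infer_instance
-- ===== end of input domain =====

-- B replaces A's per-index forward rescans by a right-to-left next-greater table built with
-- pointer jumping, then reconstructs each -1-padded block from the table (objective: alternative).

-- ===== PORT A =====
-- inner 'for j in range(i, len(nums)): …' with break, carried as structural recursion on the range list
def pvInnerA (nums : List Int) (pivot : Int) : List Int → List Int → List Int
  | res, [] => res
  | res, j :: js =>
    if PySem.List.pyGetD nums j 0 > pivot then res ++ [j]
    else pvInnerA nums pivot (res ++ [-1]) js

def larger_number (nums : List Int) : List Int :=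
  -- Python returns None on []; that input is excluded by Pre_larger_number, [] stands in
  if nums = [] then [] else
  (PySem.List.pyRange 0 ((nums.length : Int) - 1) 1).foldl (fun res i =>
    if PySem.List.pyGetD nums (i + 1) 0 ≤ PySem.List.pyGetD nums i 0 then
      pvInnerA nums (PySem.List.pyGetD nums i 0) res (PySem.List.pyRange i (nums.length : Int) 1)
    else if PySem.List.pyGetD nums (i + 1) 0 > PySem.List.pyGetD nums i 0 then
      res ++ [i + 1]
    else res) []

-- ===== PORT B =====
-- 'while j < n and nums[j] <= nums[i]: j = ng[j]' — fuel only makes the recursion total;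
-- fuel = n is proved sufficient below
def pvJump (nums ng : List Int) (pivot : Int) : Int → Nat → Int
  | j, 0 => j
  | j, fuel + 1 =>
    if j < (nums.length : Int) ∧ PySem.List.pyGetD nums j 0 ≤ pivot then
      pvJump nums ng pivot (PySem.List.pyGetD ng j 0) fuel
    else j

-- ng = [n]*n  then  'for i in range(n-2, -1, -1): … ng[i] = j'
def pvNgTable (nums : List Int) : List Int :=
  (PySem.List.pyRange ((nums.length : Int) - 2) (-1) (-1)).foldl (fun ng i =>
    PySem.List.pySetD ng i (pvJump nums ng (PySem.List.pyGetD nums i 0) (i + 1) nums.length))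
    (List.replicate nums.length (nums.length : Int))

def larger_number_alt (nums : List Int) : List Int :=
  if nums = [] then [] else
  (PySem.List.pyRange 0 ((nums.length : Int) - 1) 1).foldl (fun res i =>
    if PySem.List.pyGetD nums (i + 1) 0 > PySem.List.pyGetD nums i 0 then
      res ++ [i + 1]
    else
      if PySem.List.pyGetD (pvNgTable nums) i 0 < (nums.length : Int) then
        res ++ List.replicate (PySem.List.pyGetD (pvNgTable nums) i 0 - i).toNat (-1)
          ++ [PySem.List.pyGetD (pvNgTable nums) i 0]
      else res ++ List.replicate ((nums.length : Int) - i).toNat (-1)) []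

-- ===== PRECONDITION & SPEC =====
-- Pre_ excludes only the empty list, on which Python A returns None instead of a list.
def Pre_larger_number (nums : List Int) : Prop := nums ≠ []
instance (nums : List Int) : Decidable (Pre_larger_number nums) := by
  unfold Pre_larger_number; infer_instance

def pvWitness_larger_number : List Int := [1]

def Spec_larger_number (nums : List Int) (out : List Int) : Prop := out = larger_number_alt nums
instance (nums : List Int) (out : List Int) : Decidable (Spec_larger_number nums out) := by
  unfold Spec_larger_number; infer_instance

-- ===== CLAIM (what is proved, stated in full; the proofs are below) =====
def Claim_equal_larger_number : Prop :=
  ∀ (nums : List Int), Dom_larger_number nums → Pre_larger_number nums →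
    Spec_larger_number nums (larger_number nums)

-- ===== LEMMAS AND PROOFS =====

-- first index ≥ j holding a value > pivot, nums.length if none (the common specification)
def pvFg (nums : List Int) (pivot : Int) (j : Nat) : Nat :=
  if h : j < nums.length then
    if nums.getD j 0 > pivot then j else pvFg nums pivot (j + 1)
  else nums.length
termination_by nums.length - j

theorem pvFg_le (nums : List Int) (pivot : Int) (j : Nat) : pvFg nums pivot j ≤ nums.length := by
  unfold pvFg
  split_ifs with h1 h2
  · omega
  · exact pvFg_le nums pivot (j + 1)
  · omega
termination_by nums.length - j

theorem le_pvFg (nums : List Int) (pivot : Int) (j : Nat) (hj : j ≤ nums.length) :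
    j ≤ pvFg nums pivot j := by
  unfold pvFg
  split_ifs with h1 h2
  · omega
  · have := le_pvFg nums pivot (j + 1) (by omega)
    omega
  · omega
termination_by nums.length - j

theorem pvFg_mem_le (nums : List Int) (pivot : Int) (j m : Nat) (h1 : j ≤ m)
    (h2 : m < pvFg nums pivot j) : nums.getD m 0 ≤ pivot := by
  unfold pvFg at h2
  split_ifs at h2 with ha hb
  · omega
  · rcases Nat.eq_or_lt_of_le h1 with h | h
    · subst h; omega
    · exact pvFg_mem_le nums pivot (j + 1) m h h2
  · have := pvFg_le nums pivot j
    omega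
termination_by nums.length - j

theorem pvFg_eq (nums : List Int) (pivot : Int) (j g : Nat) (hj : j ≤ g) (hg : g ≤ nums.length)
    (hmem : ∀ m, j ≤ m → m < g → nums.getD m 0 ≤ pivot)
    (hgt : g < nums.length → nums.getD g 0 > pivot) :
    pvFg nums pivot j = g := by
  unfold pvFg
  split_ifs with h1 h2
  · -- nums[j] > pivot : j = g
    by_contra hne
    have hjg : j < g := by omega
    have := hmem j le_rfl hjg
    omega
  · rcases Nat.eq_or_lt_of_le hj with h | h
    · subst h; omega
    · exact pvFg_eq nums pivot (j + 1) g h hg (fun m hm1 hm2 => hmem m (by omega) hm2) hgt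
  · omega
termination_by nums.length - j

-- abbreviation: next strictly greater index of position t (nums.length if none)
def pvNG (nums : List Int) (t : Nat) : Nat := pvFg nums (nums.getD t 0) (t + 1)

theorem pvInnerA_eq (nums : List Int) (pivot : Int) (j : Nat) (hj : j ≤ nums.length)
    (res : List Int) :
    pvInnerA nums pivot res (PySem.List.pyRange (j : Int) (nums.length : Int) 1) =
      res ++ List.replicate (pvFg nums pivot j - j) (-1) ++
        (if pvFg nums pivot j < nums.length then [(pvFg nums pivot j : Int)] else []) := by
  by_cases hjn : j < nums.length
  · rw [PySem.List.pyRange_one_cons (by exact_mod_cast hjn)]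
    unfold pvInnerA
    rw [PySem.List.pyGetD_natCast]
    by_cases hgt : nums.getD j 0 > pivot
    · rw [if_pos hgt]
      have hf : pvFg nums pivot j = j := by
        unfold pvFg; rw [dif_pos hjn, if_pos hgt]
      simp [hf, hjn]
    · rw [if_neg hgt]
      have hf : pvFg nums pivot j = pvFg nums pivot (j + 1) := by
        conv_lhs => rw [pvFg]
        rw [dif_pos hjn, if_neg hgt]
      have hcast : (j : Int) + 1 = ((j + 1 : Nat) : Int) := by push_cast; ring
      rw [hcast, pvInnerA_eq nums pivot (j + 1) (by omega) (res ++ [-1])]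
      have hge : j + 1 ≤ pvFg nums pivot (j + 1) := le_pvFg nums pivot (j + 1) (by omega)
      have hrep : List.replicate (pvFg nums pivot j - j) (-1 : Int)
          = -1 :: List.replicate (pvFg nums pivot (j + 1) - (j + 1)) (-1) := by
        rw [hf]
        have : pvFg nums pivot (j + 1) - j = (pvFg nums pivot (j + 1) - (j + 1)) + 1 := by omega
        rw [this, List.replicate_succ]
      rw [hrep, hf]
      simp
  · have hj' : j = nums.length := by omega
    subst hj'
    rw [PySem.List.pyRange_one_eq_nil (by omega)]
    have hf : pvFg nums pivot nums.length = nums.length := by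
      unfold pvFg; rw [dif_neg (by omega)]
    unfold pvInnerA
    simp [hf]
termination_by nums.length - j

theorem pvJump_eq (nums ng : List Int) (i : Nat)
    (hng : ∀ t : Nat, i < t → t < nums.length → ng.getD t 0 = (pvNG nums t : Int)) :
    ∀ (fuel jN : Nat), i < jN → jN ≤ nums.length →
      (∀ m : Nat, i < m → m < jN → nums.getD m 0 ≤ nums.getD i 0) →
      nums.length - jN < fuel →
      pvJump nums ng (nums.getD i 0) (jN : Int) fuel = (pvNG nums i : Int) := by
  intro fuel
  induction fuel with
  | zero => intro jN _ _ _ h4; omega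
  | succ f ih =>
    intro jN hij hjn hbelow hfuel
    unfold pvJump
    simp only [PySem.List.pyGetD_natCast]
    by_cases hc : (jN : Int) < (nums.length : Int) ∧ nums.getD jN 0 ≤ nums.getD i 0
    · rw [if_pos hc]
      have hjlt : jN < nums.length := by exact_mod_cast hc.1
      have hngj : ng.getD jN 0 = (pvNG nums jN : Int) := hng jN hij hjlt
      rw [hngj]
      have hlt1 : jN < pvNG nums jN :=
        Nat.lt_of_lt_of_le (Nat.lt_succ_self _)
          (le_pvFg nums (nums.getD jN 0) (jN + 1) (by omega))
      have hle2 : pvNG nums jN ≤ nums.length := pvFg_le nums (nums.getD jN 0) (jN + 1)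
      apply ih (pvNG nums jN) (by omega) hle2 ?_ (by omega)
      intro m him hm
      by_cases hmj : m < jN
      · exact hbelow m him hmj
      · by_cases hmej : m = jN
        · subst hmej; exact hc.2
        · have hmm : nums.getD m 0 ≤ nums.getD jN 0 :=
            pvFg_mem_le nums (nums.getD jN 0) (jN + 1) m (by omega) hm
          exact le_trans hmm hc.2
    · rw [if_neg hc]
      have hcc : jN < nums.length → nums.getD jN 0 > nums.getD i 0 := by
        intro hlt
        by_contra hle
        exact hc ⟨by exact_mod_cast hlt, by omega⟩
      have : pvNG nums i = jN :=
        pvFg_eq nums (nums.getD i 0) (i + 1) jN (by omega) hjn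
          (fun m hm1 hm2 => hbelow m (by omega) hm2) hcc
      rw [this]

theorem pvFg_of_ge (nums : List Int) (pivot : Int) (j : Nat) (h : nums.length ≤ j) :
    pvFg nums pivot j = nums.length := by
  unfold pvFg; rw [dif_neg (by omega)]

theorem pvStep_spec (nums ng : List Int) (iN : Nat) (hin : iN < nums.length)
    (hlen : ng.length = nums.length)
    (hng : ∀ t : Nat, iN < t → t < nums.length → ng.getD t 0 = (pvNG nums t : Int)) :
    (PySem.List.pySetD ng (iN : Int)
        (pvJump nums ng (PySem.List.pyGetD nums (iN : Int) 0) ((iN : Int) + 1) nums.length)).length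
      = nums.length ∧
    ∀ t : Nat,
      (PySem.List.pySetD ng (iN : Int)
          (pvJump nums ng (PySem.List.pyGetD nums (iN : Int) 0) ((iN : Int) + 1) nums.length)).getD t 0
        = if t = iN then (pvNG nums iN : Int) else ng.getD t 0 := by
  have hjv : pvJump nums ng (PySem.List.pyGetD nums (iN : Int) 0) ((iN : Int) + 1) nums.length
      = (pvNG nums iN : Int) := by
    rw [PySem.List.pyGetD_natCast, show ((iN : Int) + 1) = ((iN + 1 : Nat) : Int) by push_cast; ring]
    exact pvJump_eq nums ng iN hng nums.length (iN + 1) (by omega) (by omega)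
      (by intro m h1 h2; omega) (by omega)
  rw [hjv, PySem.List.pySetD_natCast]
  refine ⟨by simp [hlen], fun t => ?_⟩
  by_cases ht : t = iN
  · rw [if_pos ht, ht]
    simp [List.getD_eq_getElem?_getD, show iN < ng.length by omega]
  · rw [if_neg ht]
    simp [List.getD_eq_getElem?_getD, Ne.symm ht]

theorem pvFoldNg (nums : List Int) : ∀ (iN : Nat) (ng : List Int), iN < nums.length →
    ng.length = nums.length →
    (∀ t : Nat, iN < t → t < nums.length → ng.getD t 0 = (pvNG nums t : Int)) →
    ∀ t : Nat, t < nums.length →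
    ((PySem.List.pyRange (iN : Int) (-1) (-1)).foldl (fun ng i =>
        PySem.List.pySetD ng i (pvJump nums ng (PySem.List.pyGetD nums i 0) (i + 1) nums.length))
        ng).getD t 0
      = (pvNG nums t : Int) := by
  intro iN
  induction iN with
  | zero =>
    intro ng hin hlen hng t ht
    rw [PySem.List.pyRange_neg_one_cons (by omega),
      PySem.List.pyRange_neg_one_eq_nil (show ((0 : Nat) : Int) - 1 ≤ -1 by norm_num)]
    simp only [List.foldl_cons, List.foldl_nil]
    obtain ⟨_, hget⟩ := pvStep_spec nums ng 0 hin hlen hng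
    rw [hget t]
    by_cases ht0 : t = 0
    · rw [if_pos ht0, ht0]
    · rw [if_neg ht0]
      exact hng t (by omega) ht
  | succ k ih =>
    intro ng hin hlen hng t ht
    rw [PySem.List.pyRange_neg_one_cons (by omega),
      show (((k + 1 : Nat) : Int) - 1) = ((k : Nat) : Int) by push_cast; ring]
    simp only [List.foldl_cons]
    obtain ⟨hlen1, hget1⟩ := pvStep_spec nums ng (k + 1) hin hlen hng
    apply ih _ (by omega) hlen1 ?_ t ht
    intro t' h1 h2
    rw [hget1 t']
    by_cases ht' : t' = k + 1
    · rw [if_pos ht', ht']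
    · rw [if_neg ht']
      exact hng t' (by omega) h2

theorem pvNgTable_spec (nums : List Int) (t : Nat) (h2 : 2 ≤ nums.length)
    (ht : t < nums.length) : (pvNgTable nums).getD t 0 = (pvNG nums t : Int) := by
  unfold pvNgTable
  rw [show ((nums.length : Int) - 2) = ((nums.length - 2 : Nat) : Int) by omega]
  apply pvFoldNg nums (nums.length - 2) _ (by omega) (by simp) ?_ t ht
  intro t' h1' h2'
  rw [List.getD_replicate _ (by omega)]
  have ht1 : nums.length ≤ t' + 1 := by omega
  unfold pvNG
  rw [pvFg_of_ge nums _ _ ht1]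

theorem larger_number_spec' (nums : List Int) (h : nums ≠ []) :
    larger_number nums = larger_number_alt nums := by
  have hlen : 0 < nums.length := List.length_pos_of_ne_nil h
  unfold larger_number larger_number_alt
  rw [if_neg h, if_neg h]
  apply PySem.List.foldl_congr_mem
  intro res i hi
  rw [PySem.List.mem_pyRange_one] at hi
  obtain ⟨hi0, hilt⟩ := hi
  obtain ⟨k, rfl⟩ : ∃ k : Nat, i = (k : Int) := ⟨i.toNat, (Int.toNat_of_nonneg hi0).symm⟩
  have hk1 : k + 1 < nums.length := by omega
  have e1 : PySem.List.pyGetD nums ((k : Int) + 1) 0 = nums.getD (k + 1) 0 := by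
    rw [show ((k : Int) + 1) = ((k + 1 : Nat) : Int) by push_cast; ring, PySem.List.pyGetD_natCast]
  simp only [e1, PySem.List.pyGetD_natCast]
  have hng : (pvNgTable nums).getD k 0 = (pvNG nums k : Int) :=
    pvNgTable_spec nums k (by omega) (by omega)
  have hngk1 : k + 1 ≤ pvNG nums k := le_pvFg nums (nums.getD k 0) (k + 1) (by omega)
  have hngkn : pvNG nums k ≤ nums.length := pvFg_le nums (nums.getD k 0) (k + 1)
  by_cases hle : nums.getD (k + 1) 0 ≤ nums.getD k 0
  · rw [if_pos hle, if_neg (show ¬ nums.getD (k + 1) 0 > nums.getD k 0 by omega)]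
    rw [pvInnerA_eq nums (nums.getD k 0) k (by omega) res]
    have hfg : pvFg nums (nums.getD k 0) k = pvNG nums k := by
      conv_lhs => rw [pvFg]
      rw [dif_pos (show k < nums.length by omega),
        if_neg (show ¬ nums.getD k 0 > nums.getD k 0 by omega)]
      rfl
    rw [hfg, hng]
    by_cases hlt : pvNG nums k < nums.length
    · rw [if_pos hlt, if_pos (show ((pvNG nums k : Nat) : Int) < (nums.length : Int) by exact_mod_cast hlt)]
      rw [show (((pvNG nums k : Nat) : Int) - (k : Int)).toNat = pvNG nums k - k by omega]
    · rw [if_neg hlt, if_neg (show ¬ ((pvNG nums k : Nat) : Int) < (nums.length : Int) by exact_mod_cast hlt)]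
      have heq : pvNG nums k = nums.length := by omega
      rw [show (((nums.length : Nat) : Int) - (k : Int)).toNat = nums.length - k by omega, heq]
      simp
  · have hgt : nums.getD (k + 1) 0 > nums.getD k 0 := by omega
    rw [if_neg hle, if_pos hgt, if_pos hgt]

-- ===== VERDICT (by name: the statement is the Claim_ definition above) =====
theorem larger_number_spec : Claim_equal_larger_number := by
  intro nums _ hpre
  unfold Spec_larger_number
  exact larger_number_spec' nums hpre
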